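-- pv_equiv track=rewrite | github.com/elupus/irgen | src/irgen/raw.py | rtrim
-- ===== SOURCE A (Python) =====
-- def rtrim(x):
--     """
--     Simplify raw string.
--
--     Drop negative trailers
--     """
--     def trimmer(y):
--         y = iter(y)
--         for z in y:
--             if z <= 0:
--                 continue
--             yield z
--             break
--         yield from y
--
--     yield from reversed(list(trimmer(reversed(list(x)))))
-- ===== SOURCE B (Python) =====
-- def rtrim(x):
--     """
--     Simplify raw string.
--
--     Drop negative trailers
--     """
--     data = list(x)
--     i = len(data)
--     while i > 0 and data[i - 1] <= 0:
--         i -= 1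
--     yield from data[:i]
-- ===== Notes on version B (the rewrite author's own statement) =====
-- stated objective: simpler
-- what changed: Replaces the double-reverse with an inner skip-then-copy generator by a single backward index scan over the materialized list followed by one prefix slice.
import Mathlib
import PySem

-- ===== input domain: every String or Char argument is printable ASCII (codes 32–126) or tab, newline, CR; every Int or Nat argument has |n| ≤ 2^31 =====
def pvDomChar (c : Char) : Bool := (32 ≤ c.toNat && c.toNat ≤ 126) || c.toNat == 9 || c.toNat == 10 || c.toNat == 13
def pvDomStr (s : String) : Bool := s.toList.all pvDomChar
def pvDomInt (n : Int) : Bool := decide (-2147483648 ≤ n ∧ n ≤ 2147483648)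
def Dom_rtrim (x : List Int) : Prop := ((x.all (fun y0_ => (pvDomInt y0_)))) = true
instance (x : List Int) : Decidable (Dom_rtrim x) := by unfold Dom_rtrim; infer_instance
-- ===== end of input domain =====

-- B replaces A's reverse→skip-generator→reverse pipeline by one backward index scan and a prefix slice (objective: simpler).


-- ===== PORT A =====
-- trimmer: consume leading values ≤ 0 of the (already reversed) list, emit the first
-- positive value and then the rest of the iterator unchanged.
def rtrimTrimmer : List Int → List Int
  | [] => []
  | z :: ys => if z ≤ 0 then rtrimTrimmer ys else z :: ys

def rtrim (x : List Int) : List Int :=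
  (rtrimTrimmer x.reverse).reverse

-- ===== PORT B =====
-- backward scan: i = len(data); while i > 0 and data[i-1] <= 0: i -= 1
def rtrimScan (data : List Int) : Nat → Nat
  | 0 => 0
  | i + 1 => if data.getD i 0 ≤ 0 then rtrimScan data i else i + 1

def rtrim_alt (x : List Int) : List Int :=
  x.take (rtrimScan x x.length)

-- ===== PRECONDITION & SPEC =====
def Spec_rtrim (x : List Int) (out : List Int) : Prop := out = rtrim_alt x
instance (x : List Int) (out : List Int) : Decidable (Spec_rtrim x out) := by unfold Spec_rtrim; infer_instance

-- ===== CLAIM (what is proved, stated in full; the proofs are below) =====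
def Claim_equal_rtrim : Prop := ∀ (x : List Int), Dom_rtrim x → Spec_rtrim x (rtrim x)

-- ===== LEMMAS AND PROOFS =====

-- the scan only looks at indices < i, so a trailing element is invisible
theorem rtrimScan_append (ys : List Int) (a : Int) :
    ∀ i, i ≤ ys.length → rtrimScan (ys ++ [a]) i = rtrimScan ys i := by
  intro i
  induction i with
  | zero => intro _; rfl
  | succ n ih =>
      intro h
      have hn : n < ys.length := Nat.lt_of_succ_le h
      have hget : (ys ++ [a]).getD n 0 = ys.getD n 0 := by
        simp [List.getD, List.getElem?_append_left hn]
      simp only [rtrimScan, hget]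
      split_ifs with hle
      · exact ih (Nat.le_of_lt hn)
      · rfl

theorem rtrimScan_le (data : List Int) : ∀ i, rtrimScan data i ≤ i := by
  intro i
  induction i with
  | zero => exact Nat.le_refl 0
  | succ n ih =>
      simp only [rtrimScan]
      split_ifs with h
      · exact Nat.le_succ_of_le ih
      · exact Nat.le_refl _

theorem rtrim_eq_alt : ∀ x : List Int, rtrim x = rtrim_alt x := by
  intro x
  induction x using List.reverseRecOn with
  | nil => rfl
  | append_singleton ys a ih =>
      unfold rtrim rtrim_alt at *
      rw [List.reverse_append, List.length_append]
      simp only [List.reverse_singleton, List.singleton_append, List.length_singleton,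
        rtrimScan]
      have hget : (ys ++ [a]).getD ys.length 0 = a := by
        simp [List.getD]
      rw [hget]
      by_cases hle : a ≤ 0
      · rw [if_pos hle]
        simp only [rtrimTrimmer, if_pos hle]
        rw [rtrimScan_append ys a ys.length (Nat.le_refl _)]
        rw [List.take_append_of_le_length (rtrimScan_le ys ys.length)]
        exact ih
      · rw [if_neg hle]
        simp only [rtrimTrimmer, if_neg hle]
        simp

-- ===== VERDICT (by name: the statement is the Claim_ definition above) =====
theorem rtrim_spec : Claim_equal_rtrim := by
  intro x _
  unfold Spec_rtrim
  exact rtrim_eq_alt x
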